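-- pv_equiv track=rewrite | github.com/pankaj-j-sharma/Python-Utilities | common/pyspark_connect.py | remove_duplicate_columns
-- ===== SOURCE A (Python) =====
-- def remove_duplicate_columns(x):
--     # Length of the column
--     col_len = len(x)
--
--     # Empty RDD - set of values
--     columns = set()
--
--     # Removing any additional spaces from the elements and adding the elements into the column from RDD 'x'
--     for col in range(col_len):
--         x_col = str(x[col]).strip()
--         columns.add(x_col)
--
--     # To check if elements are present in the provided dataframe/RDD
--     if len(columns) < col_len:
--         return []
--
--     # Returning the sorted list of items in each element as tuple
--     return [(tuple(sorted(columns)))]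
-- ===== SOURCE B (Python) =====
-- def remove_duplicate_columns(x):
--     # sort the stripped column names once; a post-strip duplicate must then be adjacent
--     s = sorted(str(c).strip() for c in x)
--     for i in range(1, len(s)):
--         if s[i] == s[i - 1]:
--             return []
--     return [tuple(s)]
-- ===== Notes on version B (the rewrite author's own statement) =====
-- stated objective: alternative
-- what changed: Replaces the build-a-set-and-compare-cardinalities duplicate test by sorting the stripped names once and scanning adjacent pairs, reusing the sort that the output needs anyway.
import Mathlib
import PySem

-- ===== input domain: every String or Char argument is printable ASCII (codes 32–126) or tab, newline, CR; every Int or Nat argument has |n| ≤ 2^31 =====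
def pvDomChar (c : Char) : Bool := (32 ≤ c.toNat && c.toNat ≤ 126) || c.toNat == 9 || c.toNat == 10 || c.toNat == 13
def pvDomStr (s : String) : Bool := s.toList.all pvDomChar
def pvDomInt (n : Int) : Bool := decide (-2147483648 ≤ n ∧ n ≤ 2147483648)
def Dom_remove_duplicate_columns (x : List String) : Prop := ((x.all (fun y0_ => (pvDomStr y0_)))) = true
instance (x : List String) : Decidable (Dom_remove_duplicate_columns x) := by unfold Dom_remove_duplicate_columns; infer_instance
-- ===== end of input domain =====

-- B sorts the stripped names once and detects duplicates by an adjacent-pair scan instead of a set-cardinality test (alternative decomposition, same cost).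

-- ===== PORT A =====
def remove_duplicate_columns (x : List String) : List (List String) :=
  let col_len : Int := (x.length : Int)
  let columns : PySem.Set String :=
    (PySem.List.pyRange 0 col_len 1).foldl
      (fun s col => PySem.Set.add s (PySem.Str.strip (PySem.List.pyGetD x col "")))
      PySem.Set.empty
  if PySem.Set.len columns < col_len then []
  else [PySem.List.sorted columns (fun y => y) false]

-- ===== PORT B =====
-- the for-loop over range(1, len(s)) comparing s[i] with s[i-1]
def pvHasAdjDup : List String → Bool
  | a :: b :: t => a == b || pvHasAdjDup (b :: t)
  | _ => false

def remove_duplicate_columns_alt (x : List String) : List (List String) :=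
  let s := PySem.List.sorted (x.map (fun c => PySem.Str.strip c)) (fun y => y) false
  if pvHasAdjDup s then [] else [s]

-- ===== PRECONDITION & SPEC =====
def Spec_remove_duplicate_columns (x : List String) (out : List (List String)) : Prop := out = remove_duplicate_columns_alt x
instance (x : List String) (out : List (List String)) : Decidable (Spec_remove_duplicate_columns x out) := by unfold Spec_remove_duplicate_columns; infer_instance

-- ===== CLAIM (what is proved, stated in full; the proofs are below) =====
def Claim_equal_remove_duplicate_columns : Prop := ∀ (x : List String), Dom_remove_duplicate_columns x → Spec_remove_duplicate_columns x (remove_duplicate_columns x)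

-- ===== LEMMAS AND PROOFS =====

-- folding Set.add over a list grows the set by at most the list length; strictly less if a duplicate or an element already present
theorem pvFoldlAdd_len_le {α : Type} [BEq α] (xs : List α) (s : List α) :
    (xs.foldl PySem.Set.add s).length ≤ s.length + xs.length := by
  induction xs generalizing s with
  | nil => simp
  | cons a xs ih =>
    simp only [List.foldl_cons]
    have h := ih (PySem.Set.add s a)
    have h2 : (PySem.Set.add s a).length ≤ s.length + 1 := by
      unfold PySem.Set.add
      split <;> simp
    have h3 : (a :: xs).length = xs.length + 1 := rfl
    omega

theorem pvFoldlAdd_len_lt {α : Type} [BEq α] [LawfulBEq α] (xs : List α) (s : List α)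
    (h : ¬ xs.Nodup ∨ ∃ a ∈ xs, a ∈ s) :
    (xs.foldl PySem.Set.add s).length < s.length + xs.length := by
  induction xs generalizing s with
  | nil =>
    rcases h with h | ⟨a, ha, _⟩
    · exact absurd List.nodup_nil h
    · exact absurd ha (List.not_mem_nil)
  | cons a xs ih =>
    simp only [List.foldl_cons]
    by_cases hmem : PySem.Set.contains s a = true
    · have hadd : PySem.Set.add s a = s := by unfold PySem.Set.add; rw [if_pos hmem]
      rw [hadd]
      have hle := pvFoldlAdd_len_le xs s
      have h3 : (a :: xs).length = xs.length + 1 := rfl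
      omega
    · have hadd : PySem.Set.add s a = s ++ [a] := by unfold PySem.Set.add; rw [if_neg hmem]
      rw [hadd]
      have has : a ∉ s := by simpa [PySem.Set.contains] using hmem
      have h' : ¬ xs.Nodup ∨ ∃ b ∈ xs, b ∈ s ++ [a] := by
        rcases h with h | ⟨b, hb, hbs⟩
        · rw [List.nodup_cons] at h
          push Not at h
          by_cases hax : a ∈ xs
          · exact Or.inr ⟨a, hax, by simp⟩
          · exact Or.inl (h hax)
        · rcases List.mem_cons.mp hb with rfl | hbxs
          · exact absurd hbs has
          · exact Or.inr ⟨b, hbxs, by simp [hbs]⟩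
      have hih := ih (s ++ [a]) h'
      have h3 : (a :: xs).length = xs.length + 1 := rfl
      have h4 : (s ++ [a]).length = s.length + 1 := by simp
      omega

theorem pvOfList_len_lt {α : Type} [BEq α] [LawfulBEq α] (xs : List α) (h : ¬ xs.Nodup) :
    (PySem.Set.ofList xs).length < xs.length := by
  rw [PySem.Set.ofList_eq_foldl]
  have := pvFoldlAdd_len_lt xs [] (Or.inl h)
  simpa using this

-- the adjacent scan: false on a Nodup list, true on a weakly sorted list with a duplicate
theorem pvHasAdjDup_eq_false_of_nodup (s : List String) (h : s.Nodup) :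
    pvHasAdjDup s = false := by
  induction s with
  | nil => rfl
  | cons a t ih =>
    cases t with
    | nil => rfl
    | cons b u =>
      rw [List.nodup_cons] at h
      have hab : a ≠ b := fun he => h.1 (he ▸ List.mem_cons_self)
      simp only [pvHasAdjDup, Bool.or_eq_false_iff]
      exact ⟨by simpa using hab, ih h.2⟩

theorem pvNodup_of_hasAdjDup_false (s : List String)
    (hp : List.Pairwise (fun a b => a ≤ b) s) (h : pvHasAdjDup s = false) : s.Nodup := by
  have hlt : List.Pairwise (fun a b : String => a < b) s := by
    induction s with
    | nil => exact List.Pairwise.nil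
    | cons a t ih =>
      cases t with
      | nil => simp
      | cons b u =>
        simp only [pvHasAdjDup, Bool.or_eq_false_iff] at h
        have hab : a ≠ b := by simpa using h.1
        rw [List.pairwise_cons] at hp
        have htail : List.Pairwise (fun a b : String => a < b) (b :: u) := ih hp.2 h.2
        rw [List.pairwise_cons]
        refine ⟨?_, htail⟩
        intro c hc
        rcases List.mem_cons.mp hc with rfl | hcu
        · exact lt_of_le_of_ne (hp.1 c hc) hab
        · have hbc : b < c := (List.pairwise_cons.mp htail).1 c hcu
          exact lt_of_le_of_lt (lt_of_le_of_ne (hp.1 b List.mem_cons_self) hab).le hbc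
  exact hlt.imp ne_of_lt

theorem remove_duplicate_columns_spec : Claim_equal_remove_duplicate_columns := by
  intro x _
  unfold Spec_remove_duplicate_columns remove_duplicate_columns remove_duplicate_columns_alt
  simp only []
  have hfold :
      (PySem.List.pyRange 0 (x.length : Int) 1).foldl
        (fun s col => PySem.Set.add s (PySem.Str.strip (PySem.List.pyGetD x col "")))
        PySem.Set.empty
      = PySem.Set.ofList (x.map (fun c => PySem.Str.strip c)) := by
    have h := PySem.List.foldl_pyRange_pyGetD' x ""
      (fun s c => PySem.Set.add s (PySem.Str.strip c)) (PySem.Set.empty) (a := 0) (by norm_num)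
    simp only [Int.toNat_zero, List.drop_zero] at h
    rw [h, PySem.Set.ofList_eq_foldl, List.foldl_map]
    rfl
  rw [hfold]
  set ys := x.map (fun c => PySem.Str.strip c) with hys
  have hlen : ys.length = x.length := by simp [hys]
  set s := PySem.List.sorted ys (fun y => y) false with hs
  have hperm : s.Perm ys := PySem.List.sorted_perm ys (fun y => y) false
  have hpair : List.Pairwise (fun a b => a ≤ b) s := PySem.List.sorted_pairwise ys (fun y => y)
  by_cases hnd : ys.Nodup
  · have hself : PySem.Set.ofList ys = ys := PySem.Set.ofList_eq_self_of_nodup ys hnd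
    rw [hself]
    have hcond : ¬ (PySem.Set.len ys < (x.length : Int)) := by
      unfold PySem.Set.len; omega
    rw [if_neg hcond]
    have hsd : s.Nodup := hperm.nodup_iff.mpr hnd
    rw [pvHasAdjDup_eq_false_of_nodup s hsd]
    simp only [Bool.false_eq_true, if_false, List.cons.injEq, and_true]
    exact hs.symm
  · have hlt := pvOfList_len_lt ys hnd
    have hcond : PySem.Set.len (PySem.Set.ofList ys) < (x.length : Int) := by
      unfold PySem.Set.len; omega
    rw [if_pos hcond]
    have htrue : pvHasAdjDup s = true := by
      by_contra h
      exact hnd (hperm.nodup_iff.mp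
        (pvNodup_of_hasAdjDup_false s hpair (Bool.not_eq_true _ ▸ eq_false_of_ne_true h)))
    rw [htrue]
    simp
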